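-- pv_equiv track=rewrite | github.com/alexandradecarvalho/artificial-intelligence | python-programming/functionsReturningNone.py | popHighLow
-- ===== SOURCE A (Python) =====
-- def popHighLow(l):
-- 	if len(l) > 1:
-- 		recursive_answer = popHighLow(l[1:-1])
-- 		minor = l[0] if l[0] < l[-1] else l[-1]
-- 		maxim = l[0] if l[0] > l[-1] else l[-1]
--
-- 		if recursive_answer:
-- 			minor = minor if minor < recursive_answer[1] else recursive_answer[1]
-- 			maxim = maxim if maxim > recursive_answer[0] else recursive_answer[0]
-- 			return (maxim, minor, [x for x in l if x != maxim and x != minor] + recursive_answer[2])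
-- 		else:
-- 			return (maxim, minor, [])
-- 	else:
-- 		return None
-- ===== SOURCE B (Python) =====
-- def popHighLow(l):
--     n = len(l)
--     if n < 2:
--         return None
--     out = []
--     for i in range((n - 2) // 2):
--         sub = l[i:n - i]
--         mx = max(sub)
--         mn = min(sub)
--         out.extend(x for x in sub if x != mx and x != mn)
--     return (max(l), min(l), out)
-- ===== Notes on version B (the rewrite author's own statement) =====
-- stated objective: faster
-- what changed: Replaced the deep recursion (which slices l[1:-1], recomputes min/max by pairwise comparison and copy-concatenates the recursive remainder list at every level) by a single iterative loop over the levels l[i:n-i] of length >= 4 that extends one output list with each level's filtered elements and uses the true max/min of each level.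
-- intended difference: On odd-length lists whose middle element is a strict extremum of its level-mates (the two/four elements adjacent to it in the innermost recursion levels), A's recursion discards the middle element at its length-1 base case so it is never compared: A returns max/min and filtered remainders that ignore the middle element, while B treats it like every other element, which is the intended max/min behaviour (e.g. [1,9,2]: A returns (2,1,[]), B returns (9,1,[])). — e.g. on popHighLow([1, 9, 2]): A returns some (2, 1, []), B returns some (9, 1, [])
import Mathlib
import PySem

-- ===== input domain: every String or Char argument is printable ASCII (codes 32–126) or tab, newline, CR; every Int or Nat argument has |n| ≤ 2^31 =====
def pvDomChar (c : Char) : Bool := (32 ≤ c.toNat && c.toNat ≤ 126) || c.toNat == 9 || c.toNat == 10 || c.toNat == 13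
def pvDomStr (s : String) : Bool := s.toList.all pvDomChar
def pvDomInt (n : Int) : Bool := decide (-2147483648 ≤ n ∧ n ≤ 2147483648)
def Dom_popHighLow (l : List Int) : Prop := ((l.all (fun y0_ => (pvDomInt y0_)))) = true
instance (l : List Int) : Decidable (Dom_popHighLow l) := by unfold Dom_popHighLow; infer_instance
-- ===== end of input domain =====

-- B replaces A's recursive copy-and-concatenate scheme by one iterative loop over the levels
-- l[i:n-i] extending a single output list (objective: faster, constant-factor); B intentionally
-- differs from A on the odd-length corner stated at D_popHighLow below.


-- needed by the termination proof of the port of A (l[1:-1] is tail.dropLast)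
theorem pySlice_one_negone (l : List Int) : PySem.List.slice l (some 1) (some (-1)) = l.tail.dropLast := by
  rcases l with _ | ⟨a, t⟩
  · simp [PySem.List.slice]
  · simp [PySem.List.slice, PySem.List.clampIdx, List.dropLast_eq_take]
    rw [if_neg (by omega)]
    omega

-- ===== PORT A =====
-- literal port of A: recursion on l[1:-1]; l[0] and l[-1] are in range since len(l) > 1,
-- so pyGetD with default 0 is exact here.
def popHighLow (l : List Int) : Option (Int × Int × List Int) :=
  if 1 < l.length then
    let recursive_answer := popHighLow (PySem.List.slice l (some 1) (some (-1)))
    let a := PySem.List.pyGetD l 0 0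
    let z := PySem.List.pyGetD l (-1) 0
    let minor := if a < z then a else z
    let maxim := if a > z then a else z
    match recursive_answer with
    | some (rmax, rmin, rrest) =>
        let minor' := if minor < rmin then minor else rmin
        let maxim' := if maxim > rmax then maxim else rmax
        some (maxim', minor', l.filter (fun x => x != maxim' && x != minor') ++ rrest)
    | none => some (maxim, minor, [])
  else none
termination_by l.length
decreasing_by
  rw [pySlice_one_negone]
  simp only [List.length_dropLast, List.length_tail]
  omega

-- ===== PORT B =====
-- literal port of B (Source B): for i in range((n-2)//2): out += filtered l[i:n-i]; then (max, min, out).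
-- max/min are taken of non-empty lists throughout, so .getD 0 is exact.
def popHighLow_alt (l : List Int) : Option (Int × Int × List Int) :=
  let n : Int := (l.length : Int)
  if n < 2 then none
  else
    let out := (PySem.List.pyRange 0 (PySem.Int.floordiv (n - 2) 2) 1).foldl
      (fun out i => out ++
        (let sub := PySem.List.slice l (some i) (some (n - i))
         let mx := (PySem.List.max? sub (fun x => x)).getD 0
         let mn := (PySem.List.min? sub (fun x => x)).getD 0
         sub.filter (fun x => x != mx && x != mn))) []
    some ((PySem.List.max? l (fun x => x)).getD 0,
          (PySem.List.min? l (fun x => x)).getD 0, out)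

-- ===== PRECONDITION & SPEC =====
-- On odd-length lists whose middle element is a strict extremum of its level-mates (the two/four
-- elements adjacent to it in the innermost recursion levels), A's recursion discards the middle
-- element at its length-1 base case so it is never compared: A's max/min and filters ignore it,
-- while B treats it like every other element, which is the intended behaviour.
def D_popHighLow (l : List Int) : Prop :=
  let h := (l.length - 1) / 2
  let c := l.getD h 0
  let w := ((l.drop (h - 2)).take 5).eraseIdx (min h 2)
  l.length % 2 = 1 ∧ 3 ≤ l.length ∧ ((∀ x ∈ w, x < c) ∨ (∀ x ∈ w, c < x))
instance (l : List Int) : Decidable (D_popHighLow l) := by unfold D_popHighLow; infer_instance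

def Spec_popHighLow (l : List Int) (out : Option (Int × Int × List Int)) : Prop :=
  ¬ D_popHighLow l → out = popHighLow_alt l
instance (l : List Int) (out : Option (Int × Int × List Int)) : Decidable (Spec_popHighLow l out) := by
  unfold Spec_popHighLow; infer_instance

def pvDiffWitness_popHighLow : List Int := [1, 9, 2]
def pvDiffWitnessOut_popHighLow : (Option (Int × Int × List Int)) × (Option (Int × Int × List Int)) :=
  (some (2, 1, []), some (9, 1, []))

-- ===== CLAIM (what is proved, stated in full; the proofs are below) =====
def Claim_unchanged_popHighLow : Prop := ∀ (l : List Int), Dom_popHighLow l → Spec_popHighLow l (popHighLow l)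
def Claim_changed_popHighLow : Prop :=
  Dom_popHighLow (pvDiffWitness_popHighLow) ∧ D_popHighLow (pvDiffWitness_popHighLow) ∧
  popHighLow (pvDiffWitness_popHighLow) = pvDiffWitnessOut_popHighLow.1 ∧
  popHighLow_alt (pvDiffWitness_popHighLow) = pvDiffWitnessOut_popHighLow.2 ∧
  pvDiffWitnessOut_popHighLow.1 ≠ pvDiffWitnessOut_popHighLow.2
def Claim_exact_popHighLow : Prop := ∀ (l : List Int), Dom_popHighLow l → D_popHighLow l →
  popHighLow l ≠ popHighLow_alt l

-- ===== LEMMAS AND PROOFS =====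

-- middle element of an odd-length list, and the elements adjacent to it in the innermost
-- recursion levels (proof-side view of the window D_ is stated with)
def phlCenter (l : List Int) : Int := l.getD ((l.length - 1) / 2) 0
def phlNbrs (l : List Int) : List Int :=
  let h := (l.length - 1) / 2
  if l.length = 3 then [l.getD 0 0, l.getD 2 0]
  else [l.getD (h - 2) 0, l.getD (h - 1) 0, l.getD (h + 1) 0, l.getD (h + 2) 0]

theorem phl_window_eq (l : List Int) (h1 : l.length % 2 = 1) (h2 : 3 ≤ l.length) :
    ((l.drop ((l.length - 1) / 2 - 2)).take 5).eraseIdx (min ((l.length - 1) / 2) 2)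
      = phlNbrs l := by
  have hdropc : ∀ i : Nat, i < l.length → l.drop i = l.getD i 0 :: l.drop (i + 1) := by
    intro i hi
    rw [List.drop_eq_getElem_cons hi, List.getD_eq_getElem l 0 hi]
  by_cases h3 : l.length = 3
  · obtain ⟨a, b, c, rfl⟩ : ∃ a b c, l = [a, b, c] := by
      rcases l with _ | ⟨a, _ | ⟨b, _ | ⟨c, _ | ⟨d, t⟩⟩⟩⟩ <;> simp_all
    simp [phlNbrs]
  · have h5 : 5 ≤ l.length := by omega
    rw [hdropc ((l.length - 1) / 2 - 2) (by omega),
        show (l.length - 1) / 2 - 2 + 1 = (l.length - 1) / 2 - 1 from by omega,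
        hdropc ((l.length - 1) / 2 - 1) (by omega),
        show (l.length - 1) / 2 - 1 + 1 = (l.length - 1) / 2 from by omega,
        hdropc ((l.length - 1) / 2) (by omega),
        hdropc ((l.length - 1) / 2 + 1) (by omega),
        hdropc ((l.length - 1) / 2 + 2) (by omega),
        show min ((l.length - 1) / 2) 2 = 2 from by omega]
    simp [List.take_succ_cons, List.eraseIdx, phlNbrs, h3]

-- the condition D_ in terms of the proof-side helpers
theorem D_iff (l : List Int) :
    D_popHighLow l ↔ l.length % 2 = 1 ∧ 3 ≤ l.length ∧
      ((∀ x ∈ phlNbrs l, x < phlCenter l) ∨ (∀ x ∈ phlNbrs l, phlCenter l < x)) := by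
  unfold D_popHighLow
  constructor
  · rintro ⟨h1, h2, h3⟩
    rw [phl_window_eq l h1 h2] at h3
    exact ⟨h1, h2, h3⟩
  · rintro ⟨h1, h2, h3⟩
    rw [← phl_window_eq l h1 h2] at h3
    exact ⟨h1, h2, h3⟩

-- running max/min of a list, with the value of the first element as seed
def phlMx (s : List Int) : Int := (PySem.List.max? s (fun x => x)).getD 0
def phlMn (s : List Int) : Int := (PySem.List.min? s (fun x => x)).getD 0

-- the elements A's recursion actually compares: all of s for even length, s minus its
-- middle element for odd length
def phlCore (s : List Int) : List Int :=
  if s.length % 2 = 0 then s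
  else s.take ((s.length - 1) / 2) ++ s.drop ((s.length - 1) / 2 + 1)

def phlTrim (s : List Int) : List Int := s.tail.dropLast

theorem phlTrim_length (s : List Int) : (phlTrim s).length = s.length - 2 := by
  simp [phlTrim]; omega

-- A's remainder accumulator, characterized
def phlGA (s : List Int) : List Int :=
  if 3 < s.length then
    s.filter (fun x => x != phlMx (phlCore s) && x != phlMn (phlCore s)) ++ phlGA (phlTrim s)
  else []
termination_by s.length
decreasing_by rw [phlTrim_length]; omega

-- B's remainder accumulator, characterized
def phlGB (s : List Int) : List Int :=
  if 3 < s.length then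
    s.filter (fun x => x != phlMx s && x != phlMn s) ++ phlGB (phlTrim s)
  else []
termination_by s.length
decreasing_by rw [phlTrim_length]; omega

-- --- generic max/min folding facts ---

theorem foldl_max_init (t : List Int) (x c : Int) :
    t.foldl max (max x c) = max x (t.foldl max c) := by
  induction t generalizing c with
  | nil => simp
  | cons d t ih => simpa [max_assoc] using ih (max c d)

theorem foldl_min_init (t : List Int) (x c : Int) :
    t.foldl min (min x c) = min x (t.foldl min c) := by
  induction t generalizing c with
  | nil => simp
  | cons d t ih => simpa [min_assoc] using ih (min c d)

theorem phlMx_cons (x : Int) (t : List Int) : phlMx (x :: t) = t.foldl max x := by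
  simp [phlMx, PySem.List.max?_id_cons]

theorem phlMn_cons (x : Int) (t : List Int) : phlMn (x :: t) = t.foldl min x := by
  simp [phlMn, PySem.List.min?_id_cons]

theorem phlMx_sandwich (x y : Int) (t : List Int) (h : t ≠ []) :
    phlMx (x :: t ++ [y]) = max (max x y) (phlMx t) := by
  obtain ⟨c, t', rfl⟩ : ∃ c t', t = c :: t' := by
    cases t with
    | nil => exact absurd rfl h
    | cons c t' => exact ⟨c, t', rfl⟩
  simp [phlMx_cons, List.foldl_append, foldl_max_init]
  omega

theorem phlMn_sandwich (x y : Int) (t : List Int) (h : t ≠ []) :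
    phlMn (x :: t ++ [y]) = min (min x y) (phlMn t) := by
  obtain ⟨c, t', rfl⟩ : ∃ c t', t = c :: t' := by
    cases t with
    | nil => exact absurd rfl h
    | cons c t' => exact ⟨c, t', rfl⟩
  simp [phlMn_cons, List.foldl_append, foldl_min_init]
  omega

theorem phlMx_pair (a z : Int) : phlMx [a, z] = max a z := by
  simp [phlMx_cons]

theorem phlMn_pair (a z : Int) : phlMn [a, z] = min a z := by
  simp [phlMn_cons]

theorem le_phlMx (s : List Int) (x : Int) (hx : x ∈ s) : x ≤ phlMx s := by
  cases s with
  | nil => cases hx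
  | cons a t =>
      have := PySem.List.max?_isMax (PySem.List.max?_id_cons a t) x hx
      simpa [phlMx_cons] using this

theorem phlMn_le (s : List Int) (x : Int) (hx : x ∈ s) : phlMn s ≤ x := by
  cases s with
  | nil => cases hx
  | cons a t =>
      have := PySem.List.min?_isMin (PySem.List.min?_id_cons a t) x hx
      simpa [phlMn_cons] using this

-- --- structure of the core (the elements A actually compares) ---

theorem phlCore_length (s : List Int) :
    (phlCore s).length = if s.length % 2 = 0 then s.length else s.length - 1 := by
  unfold phlCore
  split
  · simp_all
  · simp; omega

theorem phlCore_ne_nil (s : List Int) (h : 2 ≤ s.length) : phlCore s ≠ [] := by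
  intro hnil
  have := phlCore_length s
  rw [hnil] at this
  simp at this
  split at this <;> omega

theorem phlCore_even (s : List Int) (h : s.length % 2 = 0) : phlCore s = s := by
  simp [phlCore, h]

theorem phlCore_decomp (s : List Int) (h : 2 ≤ s.length) :
    phlCore s = PySem.List.pyGetD s 0 0 :: phlCore (phlTrim s) ++ [PySem.List.pyGetD s (-1) 0] := by
  obtain ⟨a, t, rfl⟩ : ∃ a t, s = a :: t := by
    cases s with
    | nil => simp at h
    | cons a t => exact ⟨a, t, rfl⟩
  obtain ⟨mid, z, rfl⟩ : ∃ mid z, t = mid ++ [z] := by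
    rcases List.eq_nil_or_concat t with h' | ⟨mid, z, hmz⟩
    · subst h'; simp at h
    · exact ⟨mid, z, by rw [hmz, List.concat_eq_append]⟩
  have htrim : phlTrim (a :: (mid ++ [z])) = mid := by
    simp [phlTrim]
  have hz : PySem.List.pyGetD (a :: (mid ++ [z])) (-1) 0 = z := by
    rw [show a :: (mid ++ [z]) = (a :: mid) ++ [z] from by simp,
      PySem.List.pyGetD_neg_one_append_singleton]
  rw [htrim, PySem.List.pyGetD_zero_cons, hz]
  have hlen : (a :: (mid ++ [z])).length = mid.length + 2 := by simp
  by_cases hp : (a :: (mid ++ [z])).length % 2 = 0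
  · rw [phlCore_even _ hp, phlCore_even mid (by omega)]; simp
  · unfold phlCore
    rw [if_neg hp, if_neg (by omega)]
    have hodd : mid.length % 2 = 1 := by omega
    set k := (mid.length - 1) / 2 with hk
    have e1 : ((a :: (mid ++ [z])).length - 1) / 2 = k + 1 := by rw [hlen]; omega
    rw [e1]
    rw [List.take_succ_cons, List.drop_succ_cons]
    rw [List.take_append_of_le_length (by omega), List.drop_append_of_le_length (by omega)]
    simp

-- --- odd lists: the max/min of the whole list vs its core ---

theorem phlCore_odd (s : List Int) (h1 : s.length % 2 = 1) :
    phlCore s = s.take ((s.length - 1) / 2) ++ s.drop ((s.length - 1) / 2 + 1) := by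
  unfold phlCore
  rw [if_neg (by omega)]

theorem phlCenter_eq_getElem (s : List Int) (h : (s.length - 1) / 2 < s.length) :
    phlCenter s = s[(s.length - 1) / 2] := by
  unfold phlCenter
  exact List.getD_eq_getElem s 0 h

theorem phl_rep (s : List Int) (h : (s.length - 1) / 2 < s.length) :
    s = s.take ((s.length - 1) / 2) ++ s[(s.length - 1) / 2] :: s.drop ((s.length - 1) / 2 + 1) := by
  conv_lhs => rw [← List.take_append_drop ((s.length - 1) / 2) s]
  rw [List.drop_eq_getElem_cons h]

theorem phlMx_center (s : List Int) (h1 : s.length % 2 = 1) (h2 : 3 ≤ s.length) :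
    phlMx s = max (phlCenter s) (phlMx (phlCore s)) := by
  have hlt : (s.length - 1) / 2 < s.length := by omega
  rw [phlCore_odd s h1, phlCenter_eq_getElem s hlt]
  obtain ⟨a, u', hu⟩ : ∃ a u', s.take ((s.length - 1) / 2) = a :: u' := by
    cases hc : s.take ((s.length - 1) / 2) with
    | nil =>
        rw [List.take_eq_nil_iff] at hc
        rcases hc with hc | hc
        · omega
        · rw [hc] at h2; simp at h2
    | cons a u' => exact ⟨a, u', rfl⟩
  conv_lhs => rw [phl_rep s hlt]
  rw [hu]
  simp only [List.cons_append, phlMx_cons, List.foldl_append, List.foldl_cons]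
  rw [show max (List.foldl max a u') s[(s.length - 1) / 2]
        = max s[(s.length - 1) / 2] (List.foldl max a u') from max_comm _ _,
      foldl_max_init]

theorem phlMn_center (s : List Int) (h1 : s.length % 2 = 1) (h2 : 3 ≤ s.length) :
    phlMn s = min (phlCenter s) (phlMn (phlCore s)) := by
  have hlt : (s.length - 1) / 2 < s.length := by omega
  rw [phlCore_odd s h1, phlCenter_eq_getElem s hlt]
  obtain ⟨a, u', hu⟩ : ∃ a u', s.take ((s.length - 1) / 2) = a :: u' := by
    cases hc : s.take ((s.length - 1) / 2) with
    | nil =>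
        rw [List.take_eq_nil_iff] at hc
        rcases hc with hc | hc
        · omega
        · rw [hc] at h2; simp at h2
    | cons a u' => exact ⟨a, u', rfl⟩
  conv_lhs => rw [phl_rep s hlt]
  rw [hu]
  simp only [List.cons_append, phlMn_cons, List.foldl_append, List.foldl_cons]
  rw [show min (List.foldl min a u') s[(s.length - 1) / 2]
        = min s[(s.length - 1) / 2] (List.foldl min a u') from min_comm _ _,
      foldl_min_init]

theorem phl_getD_mem_core (s : List Int) (h1 : s.length % 2 = 1) (i : Nat)
    (hi : i < s.length) (hne : i ≠ (s.length - 1) / 2) :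
    s.getD i 0 ∈ phlCore s := by
  rw [phlCore_odd s h1, List.getD_eq_getElem s 0 hi]
  rcases Nat.lt_or_ge i ((s.length - 1) / 2) with hlt | hge
  · apply List.mem_append_left
    have hx : s[i] = (s.take ((s.length - 1) / 2))[i]'(by simp; omega) := by
      rw [List.getElem_take]
    rw [hx]
    exact List.getElem_mem _
  · apply List.mem_append_right
    have hge' : (s.length - 1) / 2 + 1 ≤ i := by omega
    have hx : s[i] = (s.drop ((s.length - 1) / 2 + 1))[i - ((s.length - 1) / 2 + 1)]'(by simp; omega) := by
      rw [List.getElem_drop]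
      congr 1
      omega
    rw [hx]
    exact List.getElem_mem _

theorem phlNbrs_mem_core (s : List Int) (h1 : s.length % 2 = 1) (h2 : 3 ≤ s.length) :
    ∀ x ∈ phlNbrs s, x ∈ phlCore s := by
  intro x hx
  unfold phlNbrs at hx
  by_cases h3 : s.length = 3
  · rw [if_pos h3] at hx
    simp only [List.mem_cons, List.not_mem_nil, or_false] at hx
    rcases hx with rfl | rfl
    · exact phl_getD_mem_core s h1 0 (by omega) (by omega)
    · exact phl_getD_mem_core s h1 2 (by omega) (by omega)
  · rw [if_neg h3] at hx
    have h5 : 5 ≤ s.length := by omega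
    simp only [List.mem_cons, List.not_mem_nil, or_false] at hx
    rcases hx with rfl | rfl | rfl | rfl
    · exact phl_getD_mem_core s h1 _ (by omega) (by omega)
    · exact phl_getD_mem_core s h1 _ (by omega) (by omega)
    · exact phl_getD_mem_core s h1 _ (by omega) (by omega)
    · exact phl_getD_mem_core s h1 _ (by omega) (by omega)

theorem phlTrim_getElem? (s : List Int) (i : Nat) (hi : i < s.length - 2) :
    (phlTrim s)[i]? = s[i + 1]? := by
  unfold phlTrim
  rw [List.dropLast_eq_take, List.getElem?_take_of_lt (by simp; omega), List.getElem?_tail]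

theorem phlCenter_trim (s : List Int) (h1 : s.length % 2 = 1) (h2 : 3 ≤ s.length) :
    phlCenter (phlTrim s) = phlCenter s := by
  unfold phlCenter
  rw [List.getD_eq_getElem?_getD, List.getD_eq_getElem?_getD, phlTrim_length]
  rw [phlTrim_getElem? s _ (by omega)]
  congr 2
  omega

theorem phlNbrs_trim (s : List Int) (h1 : s.length % 2 = 1) (h2 : 7 ≤ s.length) :
    phlNbrs (phlTrim s) = phlNbrs s := by
  unfold phlNbrs
  rw [phlTrim_length, if_neg (by omega), if_neg (by omega)]
  have hgd : ∀ (i : Nat), i + 1 < s.length - 1 → (phlTrim s).getD i 0 = s.getD (i + 1) 0 := by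
    intro i hjl
    rw [List.getD_eq_getElem?_getD, List.getD_eq_getElem?_getD,
      phlTrim_getElem? s i (by omega)]
  rw [hgd _ (by omega), hgd _ (by omega), hgd _ (by omega), hgd _ (by omega)]
  have e1 : (s.length - 2 - 1) / 2 - 2 + 1 = (s.length - 1) / 2 - 2 := by omega
  have e2 : (s.length - 2 - 1) / 2 - 1 + 1 = (s.length - 1) / 2 - 1 := by omega
  have e3 : (s.length - 2 - 1) / 2 + 1 + 1 = (s.length - 1) / 2 + 1 := by omega
  have e4 : (s.length - 2 - 1) / 2 + 2 + 1 = (s.length - 1) / 2 + 2 := by omega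
  rw [e1, e2, e3]

-- --- characterizations of the two ports ---

theorem phlCore_short (s : List Int) (h : s.length ≤ 1) : phlCore s = [] := by
  cases s with
  | nil => simp [phlCore]
  | cons a t =>
      have : t = [] := by simpa using h
      subst this
      simp [phlCore]

theorem popHighLow_char (s : List Int) :
    popHighLow s = if 1 < s.length then some (phlMx (phlCore s), phlMn (phlCore s), phlGA s) else none := by
  induction hn : s.length using Nat.strong_induction_on generalizing s with
  | _ n ih =>
  subst hn
  rw [popHighLow]
  by_cases h1 : 1 < s.length
  · rw [if_pos h1, if_pos h1]
    rw [pySlice_one_negone]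
    rw [show s.tail.dropLast = phlTrim s from rfl]
    rw [ih (phlTrim s).length (by rw [phlTrim_length]; omega) (phlTrim s) rfl]
    have hd := phlCore_decomp s (by omega)
    by_cases h3 : 3 < s.length
    · rw [if_pos (by rw [phlTrim_length]; omega)]
      have hcne : phlCore (phlTrim s) ≠ [] := phlCore_ne_nil _ (by rw [phlTrim_length]; omega)
      have hmx : phlMx (phlCore s)
          = max (max (PySem.List.pyGetD s 0 0) (PySem.List.pyGetD s (-1) 0)) (phlMx (phlCore (phlTrim s))) := by
        rw [hd, phlMx_sandwich _ _ _ hcne]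
      have hmn : phlMn (phlCore s)
          = min (min (PySem.List.pyGetD s 0 0) (PySem.List.pyGetD s (-1) 0)) (phlMn (phlCore (phlTrim s))) := by
        rw [hd, phlMn_sandwich _ _ _ hcne]
      have emx : (if (if PySem.List.pyGetD s 0 0 > PySem.List.pyGetD s (-1) 0 then PySem.List.pyGetD s 0 0 else PySem.List.pyGetD s (-1) 0) > phlMx (phlCore (phlTrim s))
            then (if PySem.List.pyGetD s 0 0 > PySem.List.pyGetD s (-1) 0 then PySem.List.pyGetD s 0 0 else PySem.List.pyGetD s (-1) 0)
            else phlMx (phlCore (phlTrim s))) = phlMx (phlCore s) := by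
        rw [hmx]; split_ifs <;> omega
      have emn : (if (if PySem.List.pyGetD s 0 0 < PySem.List.pyGetD s (-1) 0 then PySem.List.pyGetD s 0 0 else PySem.List.pyGetD s (-1) 0) < phlMn (phlCore (phlTrim s))
            then (if PySem.List.pyGetD s 0 0 < PySem.List.pyGetD s (-1) 0 then PySem.List.pyGetD s 0 0 else PySem.List.pyGetD s (-1) 0)
            else phlMn (phlCore (phlTrim s))) = phlMn (phlCore s) := by
        rw [hmn]; split_ifs <;> omega
      simp only [emx, emn]
      conv_rhs => rw [phlGA, if_pos h3]
    · rw [if_neg (by rw [phlTrim_length]; omega)]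
      have hcs : phlCore s = [PySem.List.pyGetD s 0 0, PySem.List.pyGetD s (-1) 0] := by
        rw [hd, phlCore_short (phlTrim s) (by rw [phlTrim_length]; omega)]
        simp
      rw [phlGA, if_neg h3, hcs, phlMx_pair, phlMn_pair]
      simp only [Option.some.injEq, Prod.mk.injEq, and_true]
      constructor
      · split_ifs <;> omega
      · split_ifs <;> omega
  · rw [if_neg h1, if_neg h1]

-- the loop body of B as a function of the level index
def phlF (s : List Int) (i : Int) : List Int :=
  let sub := PySem.List.slice s (some i) (some ((s.length : Int) - i))
  let mx := (PySem.List.max? sub (fun x => x)).getD 0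
  let mn := (PySem.List.min? sub (fun x => x)).getD 0
  sub.filter (fun x => x != mx && x != mn)

theorem dropLast_drop_comm (l : List Int) (n : Nat) : l.dropLast.drop n = (l.drop n).dropLast := by
  simp [List.dropLast_eq_take, List.drop_take]
  omega

theorem take_dropLast_comm (l : List Int) (m : Nat) (h : m ≤ l.length - 1) :
    l.dropLast.take m = l.take m := by
  rw [List.dropLast_eq_take, List.take_take]
  congr 1
  omega

theorem slice_shift (s : List Int) (j : Nat) (hj : 2 * j + 4 ≤ s.length) :
    PySem.List.slice s (some ((j : Int) + 1)) (some ((s.length : Int) - ((j : Int) + 1)))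
      = PySem.List.slice (phlTrim s) (some (j : Int)) (some (((phlTrim s).length : Int) - (j : Int))) := by
  have h1 : ((j : Int) + 1) = ((j + 1 : Nat) : Int) := by push_cast; ring
  have h2 : ((s.length : Int) - ((j : Int) + 1)) = ((s.length - (j + 1) : Nat) : Int) := by omega
  have h3 : (((phlTrim s).length : Int) - (j : Int)) = ((s.length - 2 - j : Nat) : Int) := by
    rw [phlTrim_length]; omega
  rw [h2, h1, h3, PySem.List.slice_natCast, PySem.List.slice_natCast]
  have h4 : (phlTrim s).drop j = (s.drop (j + 1)).dropLast := by
    unfold phlTrim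
    rw [← List.drop_one, dropLast_drop_comm, List.drop_drop, Nat.add_comm]
  rw [h4, take_dropLast_comm _ _ (by simp; omega)]
  congr 1
  omega

theorem phlF_shift (s : List Int) (j : Nat) (hj : 2 * j + 4 ≤ s.length) :
    phlF s ((j : Int) + 1) = phlF (phlTrim s) (j : Int) := by
  unfold phlF
  rw [slice_shift s j hj]

theorem flat_levels (s : List Int) :
    (PySem.List.pyRange 0 (PySem.Int.floordiv ((s.length : Int) - 2) 2) 1).flatMap (phlF s)
      = phlGB s := by
  induction hn : s.length using Nat.strong_induction_on generalizing s with
  | _ n ih =>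
  subst hn
  rw [PySem.Int.floordiv_eq_ediv_of_pos (by omega)]
  by_cases h3 : 3 < s.length
  · rw [PySem.List.pyRange_one_cons (by omega), List.flatMap_cons]
    have hF0 : phlF s 0 = s.filter (fun x => x != phlMx s && x != phlMn s) := by
      unfold phlF
      have hs : PySem.List.slice s (some 0) (some ((s.length : Int) - 0)) = s := by
        rw [PySem.List.slice_zero_start, sub_zero, PySem.List.slice_to_natCast, List.take_length]
      rw [hs]
      rfl
    have hshift : PySem.List.pyRange 1 (((s.length : Int) - 2) / 2) 1
        = (PySem.List.pyRange 0 (((s.length : Int) - 2) / 2 - 1) 1).map (fun i => i + 1) := by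
      rw [PySem.List.pyRange_one, PySem.List.pyRange_one, List.map_map, sub_zero]
      refine List.map_congr_left ?_
      intro k _
      simp only [Function.comp_apply]
      omega
    simp only [zero_add]
    rw [hF0, hshift, List.flatMap_map]
    have hcomp : ∀ i ∈ PySem.List.pyRange 0 (((s.length : Int) - 2) / 2 - 1) 1,
        phlF s (i + 1) = phlF (phlTrim s) i := by
      intro i hi
      rw [PySem.List.mem_pyRange_one] at hi
      have hi' : i = ((i.toNat : Nat) : Int) := by omega
      rw [hi', phlF_shift s i.toNat (by omega)]
    rw [List.flatMap_congr hcomp]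
    have IH := ih (phlTrim s).length (by rw [phlTrim_length]; omega) (phlTrim s) rfl
    rw [PySem.Int.floordiv_eq_ediv_of_pos (by omega)] at IH
    have e5 : ((s.length : Int) - 2) / 2 - 1 = (((phlTrim s).length : Int) - 2) / 2 := by
      rw [phlTrim_length]; omega
    rw [e5, IH]
    conv_rhs => rw [phlGB, if_pos h3]
  · rw [PySem.List.pyRange_one_eq_nil (by omega), phlGB, if_neg h3]
    simp

theorem popHighLow_alt_char (s : List Int) :
    popHighLow_alt s = if 1 < s.length then some (phlMx s, phlMn s, phlGB s) else none := by
  unfold popHighLow_alt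
  by_cases h1 : 1 < s.length
  · rw [if_neg (by omega), if_pos h1]
    rw [PySem.List.foldl_append_eq_flatMap, List.nil_append]
    rw [← flat_levels s]
    rfl
  · rw [if_pos (by omega), if_neg h1]

theorem phlGA_even (s : List Int) (h : s.length % 2 = 0) : phlGA s = phlGB s := by
  induction hn : s.length using Nat.strong_induction_on generalizing s with
  | _ n ih =>
  subst hn
  rw [phlGA, phlGB]
  by_cases h3 : 3 < s.length
  · rw [if_pos h3, if_pos h3, phlCore_even s h,
      ih (phlTrim s).length (by rw [phlTrim_length]; omega) (phlTrim s)
        (by rw [phlTrim_length]; omega) rfl]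
  · rw [if_neg h3, if_neg h3]

theorem odd_main (s : List Int) (h1 : s.length % 2 = 1) (h2 : 3 ≤ s.length)
    (hup : ∃ x ∈ phlNbrs s, phlCenter s ≤ x) (hdn : ∃ x ∈ phlNbrs s, x ≤ phlCenter s) :
    phlMx (phlCore s) = phlMx s ∧ phlMn (phlCore s) = phlMn s ∧ phlGA s = phlGB s := by
  induction hn : s.length using Nat.strong_induction_on generalizing s with
  | _ n ih =>
  subst hn
  obtain ⟨x, hxn, hxc⟩ := hup
  obtain ⟨y, hyn, hyc⟩ := hdn
  have hxcore := phlNbrs_mem_core s h1 h2 x hxn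
  have hycore := phlNbrs_mem_core s h1 h2 y hyn
  have hmx : phlMx (phlCore s) = phlMx s := by
    rw [phlMx_center s h1 h2]
    have := le_phlMx (phlCore s) x hxcore
    omega
  have hmn : phlMn (phlCore s) = phlMn s := by
    rw [phlMn_center s h1 h2]
    have := phlMn_le (phlCore s) y hycore
    omega
  refine ⟨hmx, hmn, ?_⟩
  rw [phlGA, phlGB]
  by_cases h3 : 3 < s.length
  · rw [if_pos h3, if_pos h3, hmx, hmn]
    by_cases h5 : s.length = 5
    · rw [phlGA, phlGB, if_neg (by rw [phlTrim_length]; omega),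
        if_neg (by rw [phlTrim_length]; omega)]
    · have h7 : 7 ≤ s.length := by omega
      rw [(ih (phlTrim s).length (by rw [phlTrim_length]; omega) (phlTrim s)
        (by rw [phlTrim_length]; omega) (by rw [phlTrim_length]; omega)
        (by rw [phlNbrs_trim s h1 h7, phlCenter_trim s h1 h2]; exact ⟨x, hxn, hxc⟩)
        (by rw [phlNbrs_trim s h1 h7, phlCenter_trim s h1 h2]; exact ⟨y, hyn, hyc⟩) rfl).2.2]
  · rw [if_neg h3, if_neg h3]

-- ----- tightness: A and B differ on every input of D_ -----

theorem phlMx_mem (s : List Int) (h : s ≠ []) : phlMx s ∈ s := by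
  cases hm : PySem.List.max? s (fun x => x) with
  | none =>
      rw [PySem.List.max?_eq_none_iff] at hm
      exact absurd hm h
  | some m =>
      have := PySem.List.max?_mem hm
      simpa [phlMx, hm] using this

theorem phlMn_mem (s : List Int) (h : s ≠ []) : phlMn s ∈ s := by
  cases hm : PySem.List.min? s (fun x => x) with
  | none =>
      rw [PySem.List.min?_eq_none_iff] at hm
      exact absurd hm h
  | some m =>
      have := PySem.List.min?_mem hm
      simpa [phlMn, hm] using this

theorem phlMn_le_phlMx (s : List Int) (h : s ≠ []) : phlMn s ≤ phlMx s :=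
  le_trans (phlMn_le s (phlMx s) (phlMx_mem s h)) (le_refl _)

theorem phlCenter_mem (s : List Int) (h2 : 3 ≤ s.length) : phlCenter s ∈ s := by
  unfold phlCenter
  rw [List.getD_eq_getElem s 0 (by omega)]
  exact List.getElem_mem _

theorem phlCore_eq_nbrs_3 (s : List Int) (h : s.length = 3) : phlCore s = phlNbrs s := by
  rcases s with _ | ⟨a, _ | ⟨b, _ | ⟨c, _ | ⟨d, t⟩⟩⟩⟩ <;> simp_all
  simp [phlCore, phlNbrs]

theorem phlCore_eq_nbrs_5 (s : List Int) (h : s.length = 5) : phlCore s = phlNbrs s := by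
  rcases s with _ | ⟨a, _ | ⟨b, _ | ⟨c, _ | ⟨d, _ | ⟨e, _ | ⟨f, t⟩⟩⟩⟩⟩⟩ <;> simp_all
  simp [phlCore, phlNbrs]

-- count of the center value in one level's A-filter vs B-filter
theorem phl_count_filter_ge (s : List Int) (h1 : s.length % 2 = 1) (h2 : 3 ≤ s.length) :
    (s.filter (fun x => x != phlMx s && x != phlMn s)).count (phlCenter s)
      ≤ (s.filter (fun x => x != phlMx (phlCore s) && x != phlMn (phlCore s))).count (phlCenter s) := by
  by_cases hM : phlMx (phlCore s) < phlCenter s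
  · have hz : (s.filter (fun x => x != phlMx s && x != phlMn s)).count (phlCenter s) = 0 := by
      rw [List.count_eq_zero]
      intro hmem
      rcases List.mem_filter.mp hmem with ⟨-, hp⟩
      have : phlCenter s ≠ phlMx s := by simpa using (And.left (by simpa using hp))
      have hx : phlMx s = phlCenter s := by
        rw [phlMx_center s h1 h2]; omega
      exact this hx.symm
    omega
  · by_cases hm : phlCenter s < phlMn (phlCore s)
    · have hz : (s.filter (fun x => x != phlMx s && x != phlMn s)).count (phlCenter s) = 0 := by
        rw [List.count_eq_zero]
        intro hmem
        rcases List.mem_filter.mp hmem with ⟨-, hp⟩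
        have : phlCenter s ≠ phlMn s := by simpa using (And.right (by simpa using hp))
        have hx : phlMn s = phlCenter s := by
          rw [phlMn_center s h1 h2]; omega
        exact this hx.symm
      omega
    · have e1 : phlMx s = phlMx (phlCore s) := by rw [phlMx_center s h1 h2]; omega
      have e2 : phlMn s = phlMn (phlCore s) := by rw [phlMn_center s h1 h2]; omega
      rw [e1, e2]

-- in D_, the innermost level's A-filter keeps the center while B's removes every copy
theorem phl_count_filter_strict (s : List Int) (h1 : s.length % 2 = 1) (h2 : 3 ≤ s.length)
    (hstrict : phlMx (phlCore s) < phlCenter s ∨ phlCenter s < phlMn (phlCore s)) :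
    (s.filter (fun x => x != phlMx s && x != phlMn s)).count (phlCenter s) = 0 ∧
    1 ≤ (s.filter (fun x => x != phlMx (phlCore s) && x != phlMn (phlCore s))).count (phlCenter s) := by
  have hcne : phlCore s ≠ [] := phlCore_ne_nil s (by omega)
  have hmnmx := phlMn_le_phlMx (phlCore s) hcne
  have hne1 : phlCenter s ≠ phlMx (phlCore s) := by rcases hstrict with h | h <;> omega
  have hne2 : phlCenter s ≠ phlMn (phlCore s) := by rcases hstrict with h | h <;> omega
  constructor
  · rw [List.count_eq_zero]
    intro hmem
    rcases List.mem_filter.mp hmem with ⟨-, hp⟩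
    have hpx : phlCenter s ≠ phlMx s ∧ phlCenter s ≠ phlMn s := by simpa using hp
    rcases hstrict with h | h
    · have hx : phlMx s = phlCenter s := by rw [phlMx_center s h1 h2]; omega
      exact hpx.1 hx.symm
    · have hx : phlMn s = phlCenter s := by rw [phlMn_center s h1 h2]; omega
      exact hpx.2 hx.symm
  · have hmem : phlCenter s ∈ s.filter (fun x => x != phlMx (phlCore s) && x != phlMn (phlCore s)) := by
      rw [List.mem_filter]
      exact ⟨phlCenter_mem s h2, by simpa using ⟨hne1, hne2⟩⟩
    exact List.one_le_count_iff.mpr hmem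

theorem phl_countGA_gt (s : List Int) (h1 : s.length % 2 = 1) (h5 : 5 ≤ s.length)
    (hD : (∀ x ∈ phlNbrs s, x < phlCenter s) ∨ (∀ x ∈ phlNbrs s, phlCenter s < x)) :
    (phlGB s).count (phlCenter s) < (phlGA s).count (phlCenter s) := by
  induction hn : s.length using Nat.strong_induction_on generalizing s with
  | _ n ih =>
  subst hn
  have h2 : 3 ≤ s.length := by omega
  rw [phlGA, phlGB, if_pos (by omega), if_pos (by omega), List.count_append, List.count_append]
  by_cases h7 : 7 ≤ s.length
  · have hge := phl_count_filter_ge s h1 h2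
    have IH := ih (phlTrim s).length (by rw [phlTrim_length]; omega) (phlTrim s)
      (by rw [phlTrim_length]; omega) (by rw [phlTrim_length]; omega)
      (by rw [phlNbrs_trim s h1 h7, phlCenter_trim s h1 h2]; exact hD) rfl
    rw [phlCenter_trim s h1 h2] at IH
    omega
  · -- the innermost level: length exactly 5
    have hlen5 : s.length = 5 := by omega
    have hcore := phlCore_eq_nbrs_5 s hlen5
    have hMmem : phlMx (phlCore s) ∈ phlNbrs s := by
      rw [← hcore]; exact phlMx_mem _ (phlCore_ne_nil s (by omega))
    have hmmem : phlMn (phlCore s) ∈ phlNbrs s := by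
      rw [← hcore]; exact phlMn_mem _ (phlCore_ne_nil s (by omega))
    have hstrict : phlMx (phlCore s) < phlCenter s ∨ phlCenter s < phlMn (phlCore s) := by
      rcases hD with h | h
      · exact Or.inl (h _ hMmem)
      · exact Or.inr (h _ hmmem)
    obtain ⟨hz, hone⟩ := phl_count_filter_strict s h1 h2 hstrict
    have hga : phlGA (phlTrim s) = [] := by rw [phlGA, if_neg (by rw [phlTrim_length]; omega)]
    have hgb : phlGB (phlTrim s) = [] := by rw [phlGB, if_neg (by rw [phlTrim_length]; omega)]
    rw [hga, hgb]
    simp only [List.count_nil]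
    omega

-- ===== VERDICT (by name: the statement is the Claim_ definition above) =====
theorem popHighLow_spec : Claim_unchanged_popHighLow := by
  intro l _hdom
  unfold Spec_popHighLow
  intro hD
  rw [popHighLow_char, popHighLow_alt_char]
  by_cases h1 : 1 < l.length
  · rw [if_pos h1, if_pos h1]
    rcases Nat.even_or_odd l.length with he | ho
    · have he2 : l.length % 2 = 0 := Nat.even_iff.mp he
      rw [phlCore_even l he2, phlGA_even l he2]
    · have ho2 : l.length % 2 = 1 := Nat.odd_iff.mp ho
      have h3 : 3 ≤ l.length := by omega
      rw [D_iff] at hD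
      push Not at hD
      obtain ⟨⟨x, hxn, hxc⟩, ⟨y, hyn, hyc⟩⟩ := hD ho2 h3
      obtain ⟨e1, e2, e3⟩ := odd_main l ho2 h3 ⟨x, hxn, by omega⟩ ⟨y, hyn, by omega⟩
      rw [e1, e2, e3]
  · rw [if_neg h1, if_neg h1]

theorem popHighLow_changed : Claim_changed_popHighLow := by
  unfold Claim_changed_popHighLow
  refine ⟨by decide, by decide, ?_, by decide, by decide⟩
  rw [popHighLow_char, phlGA]
  decide

theorem popHighLow_tight : Claim_exact_popHighLow := by
  intro l _hdom hD
  rw [D_iff] at hD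
  obtain ⟨h1, h2, hD⟩ := hD
  rw [popHighLow_char, popHighLow_alt_char, if_pos (by omega), if_pos (by omega)]
  intro heq
  rw [Option.some_inj, Prod.ext_iff, Prod.ext_iff] at heq
  obtain ⟨e1, e2, e3⟩ := heq
  dsimp only at e1 e2 e3
  by_cases h5 : 5 ≤ l.length
  · have := phl_countGA_gt l h1 h5 hD
    rw [e3] at this
    omega
  · have h3 : l.length = 3 := by omega
    have hcore := phlCore_eq_nbrs_3 l h3
    have hMmem : phlMx (phlCore l) ∈ phlNbrs l := by
      rw [← hcore]; exact phlMx_mem _ (phlCore_ne_nil l (by omega))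
    have hmmem : phlMn (phlCore l) ∈ phlNbrs l := by
      rw [← hcore]; exact phlMn_mem _ (phlCore_ne_nil l (by omega))
    rcases hD with h | h
    · have hlt := h _ hMmem
      rw [phlMx_center l h1 h2] at e1
      omega
    · have hlt := h _ hmmem
      rw [phlMn_center l h1 h2] at e2
      omega
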